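-- pv_equiv track=rewrite | github.com/alsonjiang/NUS-homework | assignment_4/assignment4_question3.py | burger_price
-- ===== SOURCE A (Python) =====
-- def burger_price(burger):
--     price = 0
--     for char in burger:
--         if char == 'B':
--             price += 5
--         elif char == 'C':
--             price += 8
--         elif char == 'P':
--             price += 9
--         elif char == 'V':
--             price += 6
--         elif char == 'O':
--             price += 5
--         elif char == 'M':
--             price += 7
--     return price
-- ===== SOURCE B (Python) =====
-- def burger_price(burger):
--     counts = {}
--     for char in burger:
--         counts[char] = counts.get(char, 0) + 1
--     prices = [('B', 5), ('C', 8), ('P', 9), ('V', 6), ('O', 5), ('M', 7)]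
--     return sum(counts.get(c, 0) * p for c, p in prices)
-- ===== Notes on version B (the rewrite author's own statement) =====
-- stated objective: alternative
-- what changed: B first builds a character frequency table in one pass, then sums count*price over the fixed six-ingredient price list, instead of A's per-character if/elif accumulation.
import Mathlib
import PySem

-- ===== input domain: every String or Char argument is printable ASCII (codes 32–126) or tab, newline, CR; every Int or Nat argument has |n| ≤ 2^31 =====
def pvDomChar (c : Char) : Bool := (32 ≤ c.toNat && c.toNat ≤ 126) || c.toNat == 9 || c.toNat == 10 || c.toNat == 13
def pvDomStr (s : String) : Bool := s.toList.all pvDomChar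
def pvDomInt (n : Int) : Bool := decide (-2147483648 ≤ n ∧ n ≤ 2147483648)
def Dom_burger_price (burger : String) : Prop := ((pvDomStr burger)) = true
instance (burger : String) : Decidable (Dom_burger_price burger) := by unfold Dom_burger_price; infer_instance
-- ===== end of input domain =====

-- B builds a character frequency table in one pass, then sums count*price over
-- the fixed six-ingredient price list (alternative decomposition, same cost).

-- ===== PORT A =====
def burger_price (burger : String) : Int :=
  burger.toList.foldl
    (fun price char =>
      if char == 'B' then price + 5
      else if char == 'C' then price + 8
      else if char == 'P' then price + 9
      else if char == 'V' then price + 6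
      else if char == 'O' then price + 5
      else if char == 'M' then price + 7
      else price)
    0

-- ===== PORT B =====
def burger_price_alt (burger : String) : Int :=
  let counts : PySem.Dict Char Int :=
    burger.toList.foldl (fun d char => d.insert char (d.getD char 0 + 1)) PySem.Dict.empty
  let prices : List (Char × Int) := [('B', 5), ('C', 8), ('P', 9), ('V', 6), ('O', 5), ('M', 7)]
  (prices.map (fun cp => counts.getD cp.1 0 * cp.2)).sum

-- ===== PRECONDITION & SPEC =====
def Spec_burger_price (burger : String) (out : Int) : Prop := out = burger_price_alt burger
instance (burger : String) (out : Int) : Decidable (Spec_burger_price burger out) := by unfold Spec_burger_price; infer_instance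

-- ===== CLAIM (what is proved, stated in full; the proofs are below) =====
def Claim_equal_burger_price : Prop := ∀ (burger : String), Dom_burger_price burger → Spec_burger_price burger (burger_price burger)

-- ===== LEMMAS AND PROOFS =====

-- A's fold, from any accumulator, equals accumulator + price-weighted counts.
theorem burger_fold_eq (l : List Char) (acc : Int) :
    l.foldl
      (fun price char =>
        if char == 'B' then price + 5
        else if char == 'C' then price + 8
        else if char == 'P' then price + 9
        else if char == 'V' then price + 6
        else if char == 'O' then price + 5
        else if char == 'M' then price + 7
        else price)
      acc
    = acc + 5 * l.count 'B' + 8 * l.count 'C' + 9 * l.count 'P'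
        + 6 * l.count 'V' + 5 * l.count 'O' + 7 * l.count 'M' := by
  induction l generalizing acc with
  | nil => simp
  | cons c t ih =>
    simp only [List.foldl_cons, ih, List.count_cons]
    clear ih
    split_ifs with hB hC hP hV hO hM <;> simp_all <;> ring

-- ===== VERDICT (by name: the statement is the Claim_ definition above) =====
theorem burger_price_spec : Claim_equal_burger_price := by
  intro burger _
  unfold Spec_burger_price burger_price burger_price_alt
  simp only [PySem.Dict.foldl_insert_getD_add_one_eq_counter, PySem.Dict.getD_counter,
    burger_fold_eq, List.map_cons, List.map_nil, List.sum_cons, List.sum_nil]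
  ring
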